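-- pv_equiv track=rewrite | github.com/Lautiim/ayed1-2025-tps | TP3/Ejercicio_01.py | es_simetrica_secundaria
-- ===== SOURCE A (Python) =====
-- def es_simetrica_secundaria(matriz: list[list[int]]) -> bool:
--     """Funcion para determinar si la matriz es simétrica con respecto a su diagonal secundaria.
--
--     Pre: Recibe una matriz de enteros.
--
--     Post: Devuelve True si la matriz es simétrica, False en caso contrario.
--     """
--     assert len(matriz) > 0 and len(matriz[0]) > 0, "La matriz no debe estar vacía."
--     assert all(isinstance(fila, list) for fila in matriz), "La matriz debe ser una lista de listas."
--     assert all(all(isinstance(elem, int) for elem in fila) for fila in matriz), "Todos los elementos de la matriz deben ser enteros."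
--     filas = len(matriz)
--     columnas = len(matriz[0])
--     if filas != columnas:
--         return False # Una matriz no cuadrada no puede ser simétrica
--
--     for i in range(filas):
--         for j in range(columnas - i - 1):
--             if matriz[i][j] != matriz[filas - j - 1][columnas - i - 1]:
--                 return False # Si encontramos un par de elementos que no son iguales, no es simétrica
--
--     return True # Si no encontramos diferencias, es simétrica
-- ===== SOURCE B (Python) =====
-- def es_simetrica_secundaria(matriz: list[list[int]]) -> bool:
--     """Simetría respecto de la diagonal secundaria, comparando la matriz entera
--     con su reflexión anti-diagonal (180°-rotación seguida de transposición)."""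
--     assert len(matriz) > 0 and len(matriz[0]) > 0, "La matriz no debe estar vacía."
--     assert all(isinstance(fila, list) for fila in matriz), "La matriz debe ser una lista de listas."
--     assert all(all(isinstance(elem, int) for elem in fila) for fila in matriz), "Todos los elementos de la matriz deben ser enteros."
--     if len(matriz) != len(matriz[0]):
--         return False
--     reflejada = [list(t) for t in zip(*(fila[::-1] for fila in reversed(matriz)))]
--     return matriz == reflejada
-- ===== Notes on version B (the rewrite author's own statement) =====
-- stated objective: idiomatic
-- what changed: Replaced the short-circuiting index-by-index double loop with building the whole anti-diagonal reflection (reverse rows, reverse each row, zip(*)-transpose) and one bulk matrix equality comparison.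
-- outside the precondition, e.g. on es_simetrica_secundaria([[3, 3], [1, 3, -1]]): A returns True, B returns False; on es_simetrica_secundaria([[1, 2], [3, 4, 5]]): A returns False, B returns False
import Mathlib
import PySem

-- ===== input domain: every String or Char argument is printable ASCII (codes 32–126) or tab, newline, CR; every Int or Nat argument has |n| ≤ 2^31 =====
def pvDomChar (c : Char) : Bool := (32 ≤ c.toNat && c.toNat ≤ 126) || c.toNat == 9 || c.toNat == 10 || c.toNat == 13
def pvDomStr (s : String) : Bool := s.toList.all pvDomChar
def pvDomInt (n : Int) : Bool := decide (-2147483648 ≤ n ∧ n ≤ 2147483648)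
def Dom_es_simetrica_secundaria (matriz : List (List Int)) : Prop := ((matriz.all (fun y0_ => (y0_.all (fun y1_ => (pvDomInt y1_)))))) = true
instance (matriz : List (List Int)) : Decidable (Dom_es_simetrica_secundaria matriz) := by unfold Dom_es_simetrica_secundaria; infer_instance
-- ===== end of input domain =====

-- B replaces A's short-circuiting index-by-index double loop by building the whole
-- anti-diagonal reflection (180° rotation then zip(*)-transposition) and comparing it
-- to the matrix in bulk (objective: idiomatic; not claimed faster).

-- ===== PORT A =====
-- Literal port of A: the square guard, then the double loop with early return,
-- rendered as short-circuiting `all` over the same ranges.  Indexing uses getD,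
-- which agrees with Python list indexing wherever the index is in range
-- (guaranteed inside Pre_); out of range Python raises (excluded by Pre_).
def es_simetrica_secundaria (matriz : List (List Int)) : Bool :=
  let filas := matriz.length
  let columnas := (matriz.headD []).length
  if filas ≠ columnas then false
  else
    (List.range filas).all fun i =>
      (List.range (columnas - i - 1)).all fun j =>
        ((matriz.getD i []).getD j 0) == ((matriz.getD (filas - j - 1) []).getD (columnas - i - 1) 0)

-- ===== PORT B =====
-- zip(*rows) exactly as Python: truncates at the first exhausted row; fuel is the
-- first row's length (an upper bound on the result length, so it is exact).
def pyZipGo : List (List Int) → Nat → List (List Int)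
  | _, 0 => []
  | rows, n+1 =>
    if rows.any List.isEmpty then []
    else (rows.map fun r => r.headD 0) :: pyZipGo (rows.map List.tail) n

def pyZipStar (rows : List (List Int)) : List (List Int) :=
  match rows with
  | [] => []
  | r0 :: _ => pyZipGo rows r0.length

def es_simetrica_secundaria_alt (matriz : List (List Int)) : Bool :=
  if matriz.length ≠ (matriz.headD []).length then false
  else
    let reflejada := pyZipStar (matriz.reverse.map List.reverse)
    matriz == reflejada

-- ===== PRECONDITION & SPEC =====
-- Pre_ excludes empty matrices / empty first rows (A's asserts fail) and ragged
-- matrices whose row count equals the first row's length, on which A either raises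
-- IndexError or returns an accidental value determined by stray extra entries;
-- ragged non-square matrices stay inside (both return False).
def Pre_es_simetrica_secundaria (matriz : List (List Int)) : Prop :=
  matriz ≠ [] ∧ matriz.headD [] ≠ [] ∧
  (matriz.length = (matriz.headD []).length →
    ∀ row ∈ matriz, row.length = matriz.length)
instance (matriz : List (List Int)) : Decidable (Pre_es_simetrica_secundaria matriz) := by unfold Pre_es_simetrica_secundaria; infer_instance

def pvWitness_es_simetrica_secundaria : List (List Int) := [[1, 2], [2, 1]]

def Spec_es_simetrica_secundaria (matriz : List (List Int)) (out : Bool) : Prop := out = es_simetrica_secundaria_alt matriz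
instance (matriz : List (List Int)) (out : Bool) : Decidable (Spec_es_simetrica_secundaria matriz out) := by unfold Spec_es_simetrica_secundaria; infer_instance

-- ===== CLAIM (what is proved, stated in full; the proofs are below) =====
def Claim_equal_es_simetrica_secundaria : Prop := ∀ (matriz : List (List Int)), Dom_es_simetrica_secundaria matriz → Pre_es_simetrica_secundaria matriz → Spec_es_simetrica_secundaria matriz (es_simetrica_secundaria matriz)

-- ===== LEMMAS AND PROOFS =====

-- entry (i,j) of the matrix, as both ports read it
def pvE (matriz : List (List Int)) (i j : Nat) : Int := (matriz.getD i []).getD j 0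

lemma pyZipGo_char (m : Nat) : ∀ (rows : List (List Int)), rows ≠ [] →
    (∀ r ∈ rows, r.length = m) →
    pyZipGo rows m = (List.range m).map (fun i => rows.map (fun r => r.getD i 0)) := by
  induction m with
  | zero => intro rows _ _; simp [pyZipGo]
  | succ m ih =>
    intro rows hne hlen
    have hnoempty : rows.any List.isEmpty = false := by
      simp only [List.any_eq_false]
      intro r hr
      have := hlen r hr
      cases r with
      | nil => simp at this
      | cons a t => simp
    have htail : ∀ r ∈ rows.map List.tail, r.length = m := by
      intro r hr
      simp only [List.mem_map] at hr
      obtain ⟨s, hs, rfl⟩ := hr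
      have := hlen s hs
      cases s with
      | nil => simp at this
      | cons a t => simpa using this
    have htne : rows.map List.tail ≠ [] := by
      cases rows with
      | nil => exact absurd rfl hne
      | cons a t => simp
    rw [pyZipGo, if_neg (by simp [hnoempty]), ih _ htne htail,
        List.range_succ_eq_map]
    simp only [List.map_cons, List.map_map]
    congr 1
    · apply List.map_congr_left
      intro r hr
      have := hlen r hr
      cases r with
      | nil => simp at this
      | cons a t => simp
    · apply List.map_congr_left
      intro i _
      simp only [Function.comp]
      apply List.map_congr_left
      intro r _
      cases r <;> simp

lemma pyZipStar_char (rows : List (List Int)) (n : Nat) (hne : rows ≠ [])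
    (hlen : ∀ r ∈ rows, r.length = n) :
    pyZipStar rows = (List.range n).map (fun i => rows.map (fun r => r.getD i 0)) := by
  match rows, hne with
  | r0 :: rest, _ =>
    have h0 : r0.length = n := hlen _ (List.mem_cons_self ..)
    show pyZipGo (r0 :: rest) r0.length = _
    rw [h0]
    exact pyZipGo_char n _ (by simp) hlen

lemma rows'_len {matriz : List (List Int)}
    (hrect : ∀ row ∈ matriz, row.length = matriz.length) :
    ∀ r ∈ matriz.reverse.map List.reverse, r.length = matriz.length := by
  intro r hr
  simp only [List.mem_map, List.mem_reverse] at hr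
  obtain ⟨s, hs, rfl⟩ := hr
  simpa using hrect s hs

lemma revD {r : List Int} {n i : Nat} (h : r.length = n) (hi : i < n) :
    r.reverse.getD i 0 = r.getD (n - 1 - i) 0 := by
  subst h
  rw [List.getD_eq_getElem _ _ (by simpa using hi), List.getElem_reverse,
      List.getD_eq_getElem _ _ (by omega)]

-- entry (i,j) of B's reflejada is entry (n-1-j, n-1-i) of the matrix
lemma refl_get {matriz : List (List Int)}
    (hrect : ∀ row ∈ matriz, row.length = matriz.length)
    {i j : Nat} (hi : i < matriz.length) (hj : j < matriz.length) :
    (((List.range matriz.length).map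
        (fun k => (matriz.reverse.map List.reverse).map (fun r => r.getD k 0))).getD i []).getD j 0
      = pvE matriz (matriz.length - 1 - j) (matriz.length - 1 - i) := by
  have hO : i < ((List.range matriz.length).map
      (fun k => (matriz.reverse.map List.reverse).map (fun r => r.getD k 0))).length := by
    simpa using hi
  rw [List.getD_eq_getElem _ _ hO, List.getElem_map, List.getElem_range]
  have hI : j < ((matriz.reverse.map List.reverse).map (fun r => r.getD i 0)).length := by
    simpa using hj
  rw [List.getD_eq_getElem _ _ hI, List.getElem_map, List.getElem_map, List.getElem_reverse]
  have hlen : matriz[matriz.length - 1 - j].length = matriz.length :=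
    hrect _ (List.getElem_mem _)
  rw [revD hlen hi]
  rw [pvE, List.getD_eq_getElem _ _ (by omega : matriz.length - 1 - j < matriz.length)]

-- B's comparison, as a pointwise condition on entries
lemma refl_eq_iff {matriz : List (List Int)} (hne : matriz ≠ [])
    (hrect : ∀ row ∈ matriz, row.length = matriz.length) :
    (matriz = pyZipStar (matriz.reverse.map List.reverse)) ↔
      (∀ i < matriz.length, ∀ j < matriz.length,
        pvE matriz i j = pvE matriz (matriz.length - 1 - j) (matriz.length - 1 - i)) := by
  have hne' : matriz.reverse.map List.reverse ≠ [] := by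
    cases matriz with
    | nil => exact absurd rfl hne
    | cons a t => simp
  rw [pyZipStar_char _ matriz.length hne' (rows'_len hrect)]
  constructor
  · intro h i hi j hj
    have h2 : pvE matriz i j
        = (((List.range matriz.length).map
            (fun k => (matriz.reverse.map List.reverse).map (fun r => r.getD k 0))).getD i []).getD j 0 := by
      conv_lhs => rw [pvE, h]
    rw [h2]
    exact refl_get hrect hi hj
  · intro h
    apply List.ext_getElem (by simp)
    intro i hi hi2
    apply List.ext_getElem
    · have := hrect _ (List.getElem_mem hi)
      simp [this]
    · intro j hj hj2
      have hjN : j < matriz.length := by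
        have := hrect _ (List.getElem_mem hi); omega
      have e1 : matriz[i][j] = pvE matriz i j := by
        rw [pvE, List.getD_eq_getElem _ _ hi, List.getD_eq_getElem _ _ hj]
      have e2 : (((List.range matriz.length).map
            (fun k => (matriz.reverse.map List.reverse).map (fun r => r.getD k 0))).getD i []).getD j 0
          = ((List.range matriz.length).map
            (fun k => (matriz.reverse.map List.reverse).map (fun r => r.getD k 0)))[i][j] := by
        rw [List.getD_eq_getElem _ _ hi2, List.getD_eq_getElem _ _ hj2]
      rw [e1, ← e2, refl_get hrect hi hjN]
      exact h i hi j hjN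

-- the triangular check of A is equivalent to the full pointwise check
lemma tri_iff_full {matriz : List (List Int)} :
    (∀ i < matriz.length, ∀ j < matriz.length - i - 1,
        pvE matriz i j = pvE matriz (matriz.length - j - 1) (matriz.length - i - 1)) ↔
      (∀ i < matriz.length, ∀ j < matriz.length,
        pvE matriz i j = pvE matriz (matriz.length - 1 - j) (matriz.length - 1 - i)) := by
  set n := matriz.length with hn
  constructor
  · intro h i hi j hj
    rcases lt_trichotomy (i + j) (n - 1) with hlt | heq | hgt
    · have := h i hi j (by omega)
      have e1 : n - j - 1 = n - 1 - j := by omega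
      have e2 : n - i - 1 = n - 1 - i := by omega
      rwa [e1, e2] at this
    · have e1 : n - 1 - j = i := by omega
      have e2 : n - 1 - i = j := by omega
      rw [e1, e2]
    · have hi' : n - 1 - j < n := by omega
      have hj' : n - 1 - i < n - (n - 1 - j) - 1 := by omega
      have := h (n - 1 - j) hi' (n - 1 - i) hj'
      have e1 : n - (n - 1 - i) - 1 = i := by omega
      have e2 : n - (n - 1 - j) - 1 = j := by omega
      rw [e1, e2] at this
      exact this.symm
  · intro h i hi j hj
    have := h i hi j (by omega)
    have e1 : n - 1 - j = n - j - 1 := by omega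
    have e2 : n - 1 - i = n - i - 1 := by omega
    rwa [e1, e2] at this

lemma square_case (matriz : List (List Int)) (hne : matriz ≠ [])
    (hrect : ∀ row ∈ matriz, row.length = matriz.length) :
    ((List.range matriz.length).all fun i =>
      (List.range (matriz.length - i - 1)).all fun j =>
        ((matriz.getD i []).getD j 0) ==
          ((matriz.getD (matriz.length - j - 1) []).getD (matriz.length - i - 1) 0))
      = (matriz == pyZipStar (matriz.reverse.map List.reverse)) := by
  rw [Bool.eq_iff_iff]
  simp only [List.all_eq_true, List.mem_range, beq_iff_eq]
  rw [refl_eq_iff hne hrect, ← tri_iff_full]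
  rfl

-- ===== VERDICT (by name: the statement is the Claim_ definition above) =====
theorem es_simetrica_secundaria_spec : Claim_equal_es_simetrica_secundaria := by
  intro matriz _ hpre
  obtain ⟨hne, hrow0, hrect⟩ := hpre
  simp only [Spec_es_simetrica_secundaria, es_simetrica_secundaria, es_simetrica_secundaria_alt]
  by_cases h : matriz.length = (matriz.headD []).length
  · rw [if_neg (by simpa using h), if_neg (by simpa using h)]
    rw [← h]
    exact square_case matriz hne (hrect h)
  · rw [if_pos (by simpa using h), if_pos (by simpa using h)]
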